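-- pv_equiv track=rewrite | github.com/tugawp/Hashcode-2020 | library.py | biggerThanMinor
-- ===== SOURCE A (Python) =====
-- def biggerThanMinor(value, booksToSend, bookValues):
--     minorValue = bookValues[booksToSend[0]]
--
--     minorIndex = 0
--
--     for i in range(1, len(booksToSend)):
--         if bookValues[booksToSend[i]] < minorValue:
--             minorValue = bookValues[booksToSend[i]]
--             minorIndex = i
--
--     if minorValue < value:
--         return minorIndex
--
--     return -1
-- ===== SOURCE B (Python) =====
-- def biggerThanMinor(value, booksToSend, bookValues):
--     vals = [bookValues[b] for b in booksToSend]
--     m = min(vals)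
--     return vals.index(m) if m < value else -1
-- ===== Notes on version B (the rewrite author's own statement) =====
-- stated objective: simpler
-- what changed: Replaces the fused running-argmin loop (tracking both minimum value and its index with manual indexing into bookValues) by a two-pass decomposition: map to the value list, take min() in one pass, locate it with .index() in another.
import Mathlib
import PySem

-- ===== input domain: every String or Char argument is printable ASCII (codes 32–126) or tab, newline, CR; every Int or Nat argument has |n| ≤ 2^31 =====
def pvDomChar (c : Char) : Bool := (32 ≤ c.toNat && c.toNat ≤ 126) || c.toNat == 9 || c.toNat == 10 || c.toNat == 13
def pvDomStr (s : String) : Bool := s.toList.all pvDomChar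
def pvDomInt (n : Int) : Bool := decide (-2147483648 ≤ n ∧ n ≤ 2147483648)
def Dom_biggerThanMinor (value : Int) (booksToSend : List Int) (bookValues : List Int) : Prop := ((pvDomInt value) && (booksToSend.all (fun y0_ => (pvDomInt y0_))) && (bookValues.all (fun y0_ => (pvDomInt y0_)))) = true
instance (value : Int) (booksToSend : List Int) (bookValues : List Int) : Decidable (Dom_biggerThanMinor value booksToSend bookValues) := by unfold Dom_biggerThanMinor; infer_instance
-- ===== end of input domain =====

-- B replaces A's fused running-argmin loop by a simpler two-pass decomposition: map to values, min(), then .index().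


-- ===== PORT A =====
def biggerThanMinor (value : Int) (booksToSend : List Int) (bookValues : List Int) : Int :=
  let minorValue := PySem.List.pyGetD bookValues (PySem.List.pyGetD booksToSend 0 0) 0
  let s := (PySem.List.pyRange 1 booksToSend.length 1).foldl
    (fun (s : Int × Int) i =>
      if PySem.List.pyGetD bookValues (PySem.List.pyGetD booksToSend i 0) 0 < s.1 then
        (PySem.List.pyGetD bookValues (PySem.List.pyGetD booksToSend i 0) 0, i)
      else s)
    (minorValue, 0)
  if s.1 < value then s.2 else -1

-- ===== PORT B =====
def biggerThanMinor_alt (value : Int) (booksToSend : List Int) (bookValues : List Int) : Int :=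
  let vals := booksToSend.map (fun b => PySem.List.pyGetD bookValues b 0)
  match PySem.List.min? vals (fun x => x) with
  | none => -1  -- unreachable under Pre_ (booksToSend nonempty); Python raises here
  | some m => if m < value then ((PySem.List.index? vals m).getD 0 : Int) else -1

-- ===== PRECONDITION & SPEC =====
-- Pre_ excludes exactly the inputs where Python A raises: empty booksToSend (IndexError)
-- or an entry of booksToSend out of range as an index into bookValues (IndexError).
def Pre_biggerThanMinor (value : Int) (booksToSend : List Int) (bookValues : List Int) : Prop :=
  booksToSend ≠ [] ∧ ∀ b ∈ booksToSend, PySem.Raise.InRange bookValues.length b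
instance (value : Int) (booksToSend : List Int) (bookValues : List Int) : Decidable (Pre_biggerThanMinor value booksToSend bookValues) := by unfold Pre_biggerThanMinor; infer_instance
def pvWitness_biggerThanMinor : Int × List Int × List Int := (3, [1, 0, 2], [5, 2, 9])

def Spec_biggerThanMinor (value : Int) (booksToSend : List Int) (bookValues : List Int) (out : Int) : Prop := out = biggerThanMinor_alt value booksToSend bookValues
instance (value : Int) (booksToSend : List Int) (bookValues : List Int) (out : Int) : Decidable (Spec_biggerThanMinor value booksToSend bookValues out) := by unfold Spec_biggerThanMinor; infer_instance

-- ===== CLAIM (what is proved, stated in full; the proofs are below) =====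
def Claim_equal_biggerThanMinor : Prop := ∀ (value : Int) (booksToSend : List Int) (bookValues : List Int), Dom_biggerThanMinor value booksToSend bookValues → Pre_biggerThanMinor value booksToSend bookValues → Spec_biggerThanMinor value booksToSend bookValues (biggerThanMinor value booksToSend bookValues)

-- ===== LEMMAS AND PROOFS =====

/-- A's fused scan, as structural recursion over the tail of the value list,
carrying (current min, its index, next index). -/
def pvFused : List Int → Int → Int → Int → Int × Int
  | [], mv, mi, _ => (mv, mi)
  | v :: t, mv, mi, k => if v < mv then pvFused t v k (k + 1) else pvFused t mv mi (k + 1)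

theorem pvFused_fst (t : List Int) : ∀ (mv mi k : Int), (pvFused t mv mi k).1 = t.foldl min mv := by
  induction t with
  | nil => intro mv mi k; simp [pvFused]
  | cons v t ih =>
    intro mv mi k
    simp only [pvFused, List.foldl_cons]
    split_ifs with h
    · rw [ih]; congr 1; omega
    · rw [ih]; congr 1; omega

theorem pvFoldl_min_le (t : List Int) : ∀ (v : Int), t.foldl min v ≤ v := by
  induction t with
  | nil => intro v; simp
  | cons u t ih =>
    intro v
    simp only [List.foldl_cons]
    exact le_trans (ih (min v u)) (min_le_left _ _)

theorem pvFoldl_min_mem (t : List Int) : ∀ (v : Int), t.foldl min v ∈ v :: t := by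
  induction t with
  | nil => intro v; simp
  | cons u t ih =>
    intro v
    simp only [List.foldl_cons]
    rcases List.mem_cons.mp (ih (min v u)) with h1 | h1
    · rcases min_choice v u with hc | hc
      · exact List.mem_cons.mpr (Or.inl (h1.trans hc))
      · exact List.mem_cons.mpr (Or.inr (List.mem_cons.mpr (Or.inl (h1.trans hc))))
    · exact List.mem_cons.mpr (Or.inr (List.mem_cons.mpr (Or.inr h1)))

theorem pvIdxOf?_eq_some (t : List Int) (x : Int) (hx : x ∈ t) :
    List.idxOf? x t = some (t.idxOf x) := by
  induction t with
  | nil => simp at hx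
  | cons v t ih =>
    by_cases hv : v = x
    · subst hv; simp [List.idxOf?_cons]
    · have hxt : x ∈ t := by
        rcases List.mem_cons.mp hx with h | h
        · exact absurd h.symm hv
        · exact h
      simp [List.idxOf?_cons, hv, ih hxt]

theorem pvFused_snd (t : List Int) : ∀ (mv mi k : Int),
    (pvFused t mv mi k).2 =
      if t.foldl min mv < mv then k + (t.idxOf (t.foldl min mv) : Int) else mi := by
  induction t with
  | nil => intro mv mi k; simp [pvFused]
  | cons v t ih =>
    intro mv mi k
    simp only [pvFused, List.foldl_cons]
    by_cases h : v < mv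
    · rw [if_pos h, ih]
      have hmin : min mv v = v := by omega
      rw [hmin]
      have hle := pvFoldl_min_le t v
      by_cases h2 : t.foldl min v < v
      · have hne : v ≠ t.foldl min v := by omega
        rw [if_pos h2, if_pos (by omega), List.idxOf_cons,
          beq_eq_false_iff_ne.mpr hne, cond_false]
        push_cast; ring
      · have heq : t.foldl min v = v := le_antisymm hle (by omega)
        rw [if_neg h2, heq, if_pos h, List.idxOf_cons]
        simp
    · rw [if_neg h, ih]
      have hmin : min mv v = mv := by omega
      rw [hmin]
      by_cases h2 : t.foldl min mv < mv
      · have hne : v ≠ t.foldl min mv := by omega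
        rw [if_pos h2, if_pos h2, List.idxOf_cons,
          beq_eq_false_iff_ne.mpr hne, cond_false]
        push_cast; ring
      · rw [if_neg h2, if_neg h2]

/-- Bridge: A's foldl over `pyRange k len` with indexed access equals `pvFused` on the dropped list. -/
theorem pvBridge (body : Int × Int → Int → Int × Int) (vals : List Int)
    (hbody : ∀ s (i : Int), 0 ≤ i → i < (vals.length : Int) → body s i =
      if vals.getD i.toNat 0 < s.1 then (vals.getD i.toNat 0, i) else s) :
    ∀ (t : List Int) (k mv mi : Int), 0 ≤ k → vals.drop k.toNat = t →
    (PySem.List.pyRange k vals.length 1).foldl body (mv, mi) = pvFused t mv mi k := by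
  intro t
  induction t with
  | nil =>
    intro k mv mi hk hdrop
    have hlen : vals.length ≤ k.toNat := by
      by_contra hlt
      have h1 : 0 < (vals.drop k.toNat).length := by
        rw [List.length_drop]; omega
      rw [hdrop] at h1; simp at h1
    rw [PySem.List.pyRange_one_eq_nil (by omega)]
    simp [pvFused]
  | cons v t ih =>
    intro k mv mi hk hdrop
    have hklen : k.toNat < vals.length := by
      by_contra hge
      rw [List.drop_eq_nil_of_le (by omega)] at hdrop
      exact List.cons_ne_nil v t hdrop.symm
    have hv : vals[k.toNat] = v := by
      have h2 : (vals.drop k.toNat)[0]'(by rw [hdrop]; simp) = vals[k.toNat] := by simp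
      rw [← h2]
      simp only [hdrop]
      rfl
    have hdrop' : vals.drop (k + 1).toNat = t := by
      have hkk : (k + 1).toNat = k.toNat + 1 := by omega
      rw [hkk, ← List.drop_drop, hdrop]; simp
    rw [PySem.List.pyRange_one_cons (by omega), List.foldl_cons,
      hbody _ k hk (by omega), List.getD_eq_getElem _ _ hklen, hv]
    simp only [pvFused]
    split_ifs with h
    · exact ih (k + 1) v k (by omega) hdrop'
    · exact ih (k + 1) mv mi (by omega) hdrop'

theorem biggerThanMinor_eq (value : Int) (b : Int) (bs : List Int) (bookValues : List Int) :
    biggerThanMinor value (b :: bs) bookValues = biggerThanMinor_alt value (b :: bs) bookValues := by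
  have hbody : ∀ (s : Int × Int) (i : Int), 0 ≤ i →
      i < ((((b :: bs).map (fun x => PySem.List.pyGetD bookValues x 0)).length : Int)) →
      (if PySem.List.pyGetD bookValues (PySem.List.pyGetD (b :: bs) i 0) 0 < s.1 then
          (PySem.List.pyGetD bookValues (PySem.List.pyGetD (b :: bs) i 0) 0, i) else s) =
      if ((b :: bs).map (fun x => PySem.List.pyGetD bookValues x 0)).getD i.toNat 0 < s.1 then
          (((b :: bs).map (fun x => PySem.List.pyGetD bookValues x 0)).getD i.toNat 0, i) else s := by
    intro s i h0 hi
    have hilen : i < (((b :: bs).length : Nat) : Int) := by simpa using hi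
    have hv : PySem.List.pyGetD bookValues (PySem.List.pyGetD (b :: bs) i 0) 0
        = ((b :: bs).map (fun x => PySem.List.pyGetD bookValues x 0)).getD i.toNat 0 := by
      rw [PySem.List.pyGetD_eq_getElem (b :: bs) 0 h0 hilen]
      have hlt : i.toNat < ((b :: bs).map (fun x => PySem.List.pyGetD bookValues x 0)).length := by
        simp only [List.length_map]; omega
      rw [List.getD_eq_getElem _ _ hlt, List.getElem_map]
    rw [hv]
  have hbridge := pvBridge _ ((b :: bs).map (fun x => PySem.List.pyGetD bookValues x 0)) hbody
    (bs.map (fun x => PySem.List.pyGetD bookValues x 0)) 1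
    (PySem.List.pyGetD bookValues b 0) 0 (by omega) (by simp)
  unfold biggerThanMinor biggerThanMinor_alt
  simp only [List.length_cons, List.length_map] at hbridge
  simp only [PySem.List.pyGetD_zero_cons, List.map_cons, List.length_cons]
  rw [hbridge]
  set v := PySem.List.pyGetD bookValues b 0 with hvdef
  set t := bs.map (fun x => PySem.List.pyGetD bookValues x 0) with ht
  set m := t.foldl min v with hm
  rw [PySem.List.min?_id_cons, ← hm, pvFused_fst, pvFused_snd, ← hm]
  have hmem : m ∈ v :: t := pvFoldl_min_mem t v
  have hmle : m ≤ v := pvFoldl_min_le t v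
  have hidx : ((PySem.List.index? (v :: t) m).getD 0 : Int)
      = if m < v then 1 + (t.idxOf m : Int) else 0 := by
    by_cases hlt : m < v
    · have hne : v ≠ m := by omega
      have hmt : m ∈ t := by
        rcases List.mem_cons.mp hmem with h | h
        · omega
        · exact h
      rw [PySem.List.index?_cons_of_ne _ hne, PySem.List.index?_eq_idxOf?,
        pvIdxOf?_eq_some t m hmt, if_pos hlt]
      simp only [Option.map_some, Option.getD_some]
      push_cast; ring
    · have heq : m = v := by omega
      rw [heq, PySem.List.index?_cons_self, if_neg (lt_irrefl v)]
      simp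
  have hmatch : (match some m with
      | none => (-1 : Int)
      | some x => if x < value then ((PySem.List.index? (v :: t) x).getD 0 : Int) else -1)
      = if m < value then ((PySem.List.index? (v :: t) m).getD 0 : Int) else -1 := rfl
  rw [hmatch, ← hidx]

-- ===== VERDICT (by name: the statement is the Claim_ definition above) =====
theorem biggerThanMinor_spec : Claim_equal_biggerThanMinor := by
  intro value booksToSend bookValues _hdom hpre
  unfold Spec_biggerThanMinor
  obtain ⟨hne, -⟩ := hpre
  cases booksToSend with
  | nil => exact absurd rfl hne
  | cons b bs => exact biggerThanMinor_eq value b bs bookValues
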